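-- pv_equiv track=rewrite | github.com/GauravMutha-QA/Feature-Data-File-Conversion | src/featureFileConversion.py | convert_to_custom_camel_case
-- ===== SOURCE A (Python) =====
-- def convert_to_custom_camel_case(s):
--     """Convert string to camelCase based on the first lowercase letter and index conditions."""
--     for i, char in enumerate(s):
--         if char.islower():
--             if i > 1:
--                 return s[:i - 1].lower() + s[i - 1:]
--             else:
--                 result = []
--                 for j, c in enumerate(s):
--                     if c.isupper() and j != 0:  # Skip the first letter since it should be lowercase
--                         return ''.join(result) + s[j:]
--                     result.append(c.lower())
--                 return ''.join(result)
--
--     return s.lower()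
-- ===== SOURCE B (Python) =====
-- def convert_to_custom_camel_case(s):
--     """Same conversion, expressed as: compute one split index k, then return s[:k].lower() + s[k:]."""
--     n = len(s)
--     i = next((idx for idx, c in enumerate(s) if c.islower()), None)
--     if i is None:
--         k = n
--     elif i >= 2:
--         k = i - 1
--     else:
--         k = next((j + 1 for j, c in enumerate(s[1:]) if c.isupper()), n)
--     return s[:k].lower() + s[k:]
-- ===== Notes on version B (the rewrite author's own statement) =====
-- stated objective: simpler
-- what changed: B computes a single split index k (first-lowercase position, or a j>=1 uppercase scan, or len(s)) and returns the one expression s[:k].lower() + s[k:], replacing A's two loops with inline returns and an append/join accumulator.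
import Mathlib
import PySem

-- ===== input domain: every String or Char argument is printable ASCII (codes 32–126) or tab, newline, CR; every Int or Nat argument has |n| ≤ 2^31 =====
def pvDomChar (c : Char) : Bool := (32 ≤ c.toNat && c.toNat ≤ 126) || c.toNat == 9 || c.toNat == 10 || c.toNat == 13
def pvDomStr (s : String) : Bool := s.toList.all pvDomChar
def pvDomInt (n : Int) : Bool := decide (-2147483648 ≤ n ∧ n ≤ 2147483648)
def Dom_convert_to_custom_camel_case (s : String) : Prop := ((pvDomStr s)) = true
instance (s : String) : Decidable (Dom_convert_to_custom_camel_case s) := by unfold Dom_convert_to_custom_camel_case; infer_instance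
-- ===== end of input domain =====

-- B replaces A's two inline-return loops and append accumulator by computing one split index k
-- and returning s[:k].lower() + s[k:] (objective: simpler decomposition, same cost).

-- ===== PORT A =====
-- inner loop of A: 'for j, c in enumerate(s): if c.isupper() and j != 0: return ''.join(result) + s[j:]; result.append(c.lower())'
def pvAInner (s : List Char) : List Char → Nat → List Char → List Char
  | [], _, res => res
  | c :: rest, j, res =>
    if PySem.Chars.isupper c && j != 0 then
      res ++ PySem.List.slice s (some (j : Int)) none
    else pvAInner s rest (j + 1) (res ++ [PySem.Chars.lowerChar c])

-- outer loop of A: 'for i, char in enumerate(s): if char.islower(): ...'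
def pvAOuter (s : List Char) : List Char → Nat → List Char
  | [], _ => PySem.Chars.lower s
  | c :: rest, i =>
    if PySem.Chars.islower c then
      if 1 < i then
        PySem.Chars.lower (PySem.List.slice s none (some ((i : Int) - 1)))
          ++ PySem.List.slice s (some ((i : Int) - 1)) none
      else pvAInner s s 0 []
    else pvAOuter s rest (i + 1)

def convert_to_custom_camel_case (s : String) : String :=
  String.mk (pvAOuter s.toList s.toList 0)

-- ===== PORT B =====
def convert_to_custom_camel_case_alt (s : String) : String :=
  let cs := s.toList
  let k : Nat :=
    match cs.findIdx? (fun c => PySem.Chars.islower c) with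
    | none => cs.length
    | some i =>
      if 2 ≤ i then i - 1
      else
        match (cs.drop 1).findIdx? (fun c => PySem.Chars.isupper c) with
        | some j => j + 1
        | none => cs.length
  String.mk (PySem.Chars.lower (cs.take k) ++ cs.drop k)

-- ===== PRECONDITION & SPEC =====
def Spec_convert_to_custom_camel_case (s : String) (out : String) : Prop := out = convert_to_custom_camel_case_alt s
instance (s : String) (out : String) : Decidable (Spec_convert_to_custom_camel_case s out) := by unfold Spec_convert_to_custom_camel_case; infer_instance

-- ===== CLAIM (what is proved, stated in full; the proofs are below) =====
def Claim_equal_convert_to_custom_camel_case : Prop := ∀ (s : String), Dom_convert_to_custom_camel_case s → Spec_convert_to_custom_camel_case s (convert_to_custom_camel_case s)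

-- ===== LEMMAS AND PROOFS =====

-- B's split index k, as a standalone function (proof helper only; identical to the match in the port of B)
def pvK (cs : List Char) : Nat :=
  match cs.findIdx? (fun c => PySem.Chars.islower c) with
  | none => cs.length
  | some i =>
    if 2 ≤ i then i - 1
    else
      match (cs.drop 1).findIdx? (fun c => PySem.Chars.isupper c) with
      | some j => j + 1
      | none => cs.length

lemma pv_alt_eq (s : String) : convert_to_custom_camel_case_alt s =
    String.mk (PySem.Chars.lower (s.toList.take (pvK s.toList)) ++ s.toList.drop (pvK s.toList)) := rfl

lemma pv_inner_eq (s : List Char) :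
    ∀ rem j, rem = s.drop j → 1 ≤ j →
    pvAInner s rem j (PySem.Chars.lower (s.take j)) =
      match rem.findIdx? (fun c => PySem.Chars.isupper c) with
      | none => PySem.Chars.lower s
      | some d => PySem.Chars.lower (s.take (j + d)) ++ s.drop (j + d) := by
  intro rem
  induction rem with
  | nil =>
    intro j hrem _
    have hj : s.length ≤ j := by
      by_contra h
      have := List.drop_eq_nil_iff.mp hrem.symm
      omega
    simp [pvAInner, List.findIdx?_nil, List.take_of_length_le hj]
  | cons c rest ih =>
    intro j hrem hj
    have hsj : s.drop j = c :: rest := hrem.symm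
    have hjlt : j < s.length := by
      by_contra h
      rw [List.drop_eq_nil_iff.mpr (by omega)] at hsj
      exact List.cons_ne_nil _ _ hsj.symm
    have hget : s[j] = c := by
      have h0 : (s.drop j)[0]? = some c := by rw [hsj]; rfl
      rw [List.getElem?_drop, Nat.add_zero] at h0
      have := List.getElem?_eq_getElem (l := s) (i := j) hjlt
      rw [this] at h0
      exact Option.some.inj h0
    have hrest : rest = s.drop (j + 1) := by
      have h1 : (s.drop j).drop 1 = rest := by simp [hsj]
      simpa [List.drop_drop, Nat.add_comm] using h1.symm
    simp only [pvAInner]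
    by_cases hup : PySem.Chars.isupper c = true
    · rw [if_pos (by simp [hup]; omega)]
      rw [List.findIdx?_cons, if_pos hup]
      simp [PySem.List.slice_from_natCast]
    · rw [if_neg (by simp [hup])]
      have hstep : PySem.Chars.lower (s.take j) ++ [PySem.Chars.lowerChar c] =
          PySem.Chars.lower (s.take (j + 1)) := by
        rw [List.take_add_one]
        simp [PySem.Chars.lower, List.getElem?_eq_getElem hjlt, hget]
      rw [hstep, ih (j + 1) hrest (by omega)]
      rw [List.findIdx?_cons, if_neg hup]
      cases hfi : rest.findIdx? (fun c => PySem.Chars.isupper c) with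
      | none => simp
      | some d =>
        simp only [Option.map_some]
        have h2 : j + 1 + d = j + (d + 1) := by omega
        simp [h2]

lemma pv_outer_eq (s : List Char) :
    ∀ rest i, rest = s.drop i →
    pvAOuter s rest i =
      match rest.findIdx? (fun c => PySem.Chars.islower c) with
      | none => PySem.Chars.lower s
      | some d =>
        if 1 < i + d then PySem.Chars.lower (s.take (i + d - 1)) ++ s.drop (i + d - 1)
        else pvAInner s s 0 [] := by
  intro rest
  induction rest with
  | nil => intro i _; simp [pvAOuter, List.findIdx?_nil]
  | cons c rest ih =>
    intro i hrem
    have hsj : s.drop i = c :: rest := hrem.symm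
    have hrest : rest = s.drop (i + 1) := by
      have h1 : (s.drop i).drop 1 = rest := by simp [hsj]
      simpa [List.drop_drop, Nat.add_comm] using h1.symm
    simp only [pvAOuter]
    by_cases hlo : PySem.Chars.islower c = true
    · rw [if_pos hlo]
      rw [List.findIdx?_cons, if_pos hlo]
      simp only [Nat.add_zero]
      by_cases hi : 1 < i
      · rw [if_pos hi, if_pos hi]
        have h1 : PySem.List.slice s none (some ((i : Int) - 1)) = s.take (i - 1) := by
          rw [show ((i : Int) - 1) = ((i - 1 : Nat) : Int) by omega, PySem.List.slice_to_natCast]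
        have h2 : PySem.List.slice s (some ((i : Int) - 1)) none = s.drop (i - 1) := by
          rw [show ((i : Int) - 1) = ((i - 1 : Nat) : Int) by omega, PySem.List.slice_from_natCast]
        rw [h1, h2]
      · rw [if_neg hi, if_neg hi]
    · rw [if_neg hlo]
      rw [ih (i + 1) hrest]
      rw [List.findIdx?_cons, if_neg hlo]
      cases hfi : rest.findIdx? (fun c => PySem.Chars.islower c) with
      | none => simp
      | some d =>
        simp only [Option.map_some]
        have h2 : i + 1 + d = i + (d + 1) := by omega
        simp [h2]

lemma pv_inner_start (c : Char) (t : List Char) :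
    pvAInner (c :: t) (c :: t) 0 [] =
      match t.findIdx? (fun c => PySem.Chars.isupper c) with
      | none => PySem.Chars.lower (c :: t)
      | some j => PySem.Chars.lower ((c :: t).take (j + 1)) ++ (c :: t).drop (j + 1) := by
  have h0 : pvAInner (c :: t) (c :: t) 0 [] =
      pvAInner (c :: t) t 1 (PySem.Chars.lower ((c :: t).take 1)) := by
    simp [pvAInner, PySem.Chars.lower]
  rw [h0, pv_inner_eq (c :: t) t 1 (by simp) (by omega)]
  cases hfi : t.findIdx? (fun c => PySem.Chars.isupper c) with
  | none => simp
  | some j => simp [Nat.add_comm 1 j]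

lemma pv_main (cs : List Char) :
    pvAOuter cs cs 0 = PySem.Chars.lower (cs.take (pvK cs)) ++ cs.drop (pvK cs) := by
  rw [pv_outer_eq cs cs 0 (by simp)]
  cases cs with
  | nil => simp [pvK, List.findIdx?_nil, PySem.Chars.lower]
  | cons c t =>
    cases hfi : List.findIdx? (fun c => PySem.Chars.islower c) (c :: t) with
    | none => simp [pvK, hfi]
    | some d =>
      simp only [pvK, hfi, Nat.zero_add]
      by_cases hd : 2 ≤ d
      · rw [if_pos (by omega), if_pos hd]
      · rw [if_neg (by omega), if_neg hd]
        rw [pv_inner_start c t]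
        simp only [List.drop_one, List.tail_cons]
        cases hfu : t.findIdx? (fun c => PySem.Chars.isupper c) with
        | none => simp
        | some j => simp

-- ===== VERDICT (by name: the statement is the Claim_ definition above) =====
theorem convert_to_custom_camel_case_spec : Claim_equal_convert_to_custom_camel_case := by
  intro s _
  unfold Spec_convert_to_custom_camel_case convert_to_custom_camel_case
  rw [pv_alt_eq]
  exact congrArg String.mk (pv_main s.toList)
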